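-- pv_equiv track=rewrite | github.com/syl0702/algo | programmers/모의고사/sol.py | solution
-- ===== SOURCE A (Python) =====
-- def solution(answers):
--     # answer = []
--     # temp = []
--     # one = [1, 2, 3, 4, 5]
--     # two = [2, 1, 2, 3, 2, 4, 2, 5]
--     # three = [3, 3, 1, 1, 2, 2, 4, 4, 5, 5]
--     # num = 0
--     # num2 = 0
--     # num3 = 0
--     # for i in range(len(answers)):
--     #     one[i]
--     #     if one[i] == answers[i]:
--     #         num += 1
--
--     #     if two[i] == answers[i]:
--     #         num2 += 1
--
--     #     if three[i] == answers[i]: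
--     #         num3 += 1
--
--     # temp = [num, num2, num3]
--     # max_value = max(temp)
--
--     # answer = [i + 1 for i, v in enumerate(temp) if v == max_value]
--
--     # return answer
--
--     answer = []
--     temp = []
--     one = [1, 2, 3, 4, 5]
--     two = [2, 1, 2, 3, 2, 4, 2, 5]
--     three = [3, 3, 1, 1, 2, 2, 4, 4, 5, 5]
--     num = 0
--     num2 = 0
--     num3 = 0
--
--     # answers 리스트의 길이에 맞춰서 one, two, three 리스트의 항목을 반복해서 접근
--     for i in range(len(answers)):
--         if one[i % len(one)] == answers[i]:
--             num += 1
--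
--         if two[i % len(two)] == answers[i]:
--             num2 += 1
--
--         if three[i % len(three)] == answers[i]:
--             num3 += 1
--
--     temp = [num, num2, num3]
--     max_value = max(temp)
--
--     answer = [i + 1 for i, v in enumerate(temp) if v == max_value]
--
--     return answer
-- ===== SOURCE B (Python) =====
-- def solution(answers):
--     # Histogram approach: 40 = lcm(5, 8, 10), so pattern p repeats with period 40;
--     # count answers by (index mod 40, value), then each score is 40 lookups.
--     cnt = {}
--     for i, a in enumerate(answers):
--         k = (i % 40, a)
--         cnt[k] = cnt.get(k, 0) + 1
--     patterns = [[1, 2, 3, 4, 5],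
--                 [2, 1, 2, 3, 2, 4, 2, 5],
--                 [3, 3, 1, 1, 2, 2, 4, 4, 5, 5]]
--     scores = [sum(cnt.get((r, p[r % len(p)]), 0) for r in range(40))
--               for p in patterns]
--     best = max(scores)
--     return [i + 1 for i, v in enumerate(scores) if v == best]
-- ===== Notes on version B (the rewrite author's own statement) =====
-- stated objective: alternative
-- what changed: Replaces A's per-element comparison against the three cyclic patterns by a histogram: one pass builds a dict counting answers keyed by (index mod 40, value) (40 = lcm of the pattern lengths), and each pattern's score is then computed by 40 dictionary lookups without revisiting the answers.
import Mathlib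
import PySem

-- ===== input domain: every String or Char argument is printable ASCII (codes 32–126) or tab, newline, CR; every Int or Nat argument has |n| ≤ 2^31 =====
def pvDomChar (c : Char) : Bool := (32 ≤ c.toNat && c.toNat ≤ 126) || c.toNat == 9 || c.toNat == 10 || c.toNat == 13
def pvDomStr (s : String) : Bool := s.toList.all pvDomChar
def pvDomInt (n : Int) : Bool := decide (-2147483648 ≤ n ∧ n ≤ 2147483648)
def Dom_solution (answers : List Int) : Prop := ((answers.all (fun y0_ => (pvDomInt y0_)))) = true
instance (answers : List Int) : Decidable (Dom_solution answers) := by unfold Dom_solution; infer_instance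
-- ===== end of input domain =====

-- B replaces A's per-element comparison against the three cyclic patterns by a histogram
-- keyed by (index mod 40, answer) — 40 = lcm of the pattern lengths — and 40 lookups per pattern.

-- ===== PORT A =====
-- A: one loop over range(len(answers)) updating three counters, then max + comprehension.
def solution (answers : List Int) : List Int :=
  let one : List Int := [1, 2, 3, 4, 5]
  let two : List Int := [2, 1, 2, 3, 2, 4, 2, 5]
  let three : List Int := [3, 3, 1, 1, 2, 2, 4, 4, 5, 5]
  let s : Int × Int × Int :=
    (PySem.List.pyRange 0 (answers.length : Int) 1).foldl
      (fun s i =>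
        ( if PySem.List.pyGetD one (PySem.Int.mod i (one.length : Int)) 0 = PySem.List.pyGetD answers i 0 then s.1 + 1 else s.1,
          if PySem.List.pyGetD two (PySem.Int.mod i (two.length : Int)) 0 = PySem.List.pyGetD answers i 0 then s.2.1 + 1 else s.2.1,
          if PySem.List.pyGetD three (PySem.Int.mod i (three.length : Int)) 0 = PySem.List.pyGetD answers i 0 then s.2.2 + 1 else s.2.2))
      (0, 0, 0)
  let temp : List Int := [s.1, s.2.1, s.2.2]
  let maxValue : Int := match PySem.List.max? temp (fun y => y) with | some m => m | none => 0
  ((PySem.List.enumerate temp).filter (fun p => p.2 == maxValue)).map (fun p => p.1 + 1)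

-- ===== PORT B =====
-- B: one pass builds cnt[(i % 40, a)]; each pattern's score = sum of 40 dict lookups.
def solution_alt (answers : List Int) : List Int :=
  let cnt : PySem.Dict (Int × Int) Int :=
    (PySem.List.enumerate answers).foldl
      (fun d p =>
        let k : Int × Int := (PySem.Int.mod p.1 40, p.2)
        d.insert k (d.getD k 0 + 1))
      PySem.Dict.empty
  let patterns : List (List Int) :=
    [[1, 2, 3, 4, 5], [2, 1, 2, 3, 2, 4, 2, 5], [3, 3, 1, 1, 2, 2, 4, 4, 5, 5]]
  let scores : List Int :=
    patterns.map (fun p =>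
      ((PySem.List.pyRange 0 40 1).map
        (fun r => cnt.getD (r, PySem.List.pyGetD p (PySem.Int.mod r (p.length : Int)) 0) 0)).sum)
  let best : Int := match PySem.List.max? scores (fun y => y) with | some m => m | none => 0
  ((PySem.List.enumerate scores).filter (fun p => p.2 == best)).map (fun p => p.1 + 1)

-- ===== PRECONDITION & SPEC =====
def Spec_solution (answers : List Int) (out : List Int) : Prop := out = solution_alt answers
instance (answers : List Int) (out : List Int) : Decidable (Spec_solution answers out) := by unfold Spec_solution; infer_instance

-- ===== CLAIM (what is proved, stated in full; the proofs are below) =====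
def Claim_equal_solution : Prop := ∀ (answers : List Int), Dom_solution answers → Spec_solution answers (solution answers)

-- ===== LEMMAS AND PROOFS =====

-- A's triple-counter fold splits into three independent 0/1 sums.
lemma triple_fold (L : List Int) (p q r : Int → Prop)
    [DecidablePred p] [DecidablePred q] [DecidablePred r] (a b c : Int) :
    L.foldl (fun s i =>
      ( if p i then s.1 + 1 else s.1,
        if q i then s.2.1 + 1 else s.2.1,
        if r i then s.2.2 + 1 else s.2.2)) (a, b, c)
    = (a + (L.map (fun i => if p i then (1 : Int) else 0)).sum,
       b + (L.map (fun i => if q i then (1 : Int) else 0)).sum,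
       c + (L.map (fun i => if r i then (1 : Int) else 0)).sum) := by
  induction L generalizing a b c with
  | nil => simp
  | cons x xs ih =>
      simp only [List.foldl_cons, List.map_cons, List.sum_cons, ih]
      split_ifs <;> simp [add_assoc]

-- One indicator summed over a duplicate-free key range: at most one key can equal q.
lemma sum_count_single (R : List Int) (hR : R.Nodup) (f : Int → Int) (q : Int × Int) :
    ((R.map (fun r => if q = (r, f r) then (1 : Nat) else 0)).sum)
    = if q.1 ∈ R ∧ q.2 = f q.1 then 1 else 0 := by
  induction R with
  | nil => simp
  | cons x xs ih =>
      simp only [List.map_cons, List.sum_cons, ih (List.nodup_cons.mp hR).2, List.mem_cons]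
      rcases q with ⟨q1, q2⟩
      by_cases hx : q1 = x
      · subst hx
        have hnot : q1 ∉ xs := (List.nodup_cons.mp hR).1
        by_cases hf : q2 = f q1 <;> simp [Prod.ext_iff, hf, hnot]
      · simp [Prod.ext_iff, hx]

-- Summing histogram counts over a duplicate-free key range = counting matches in the list.
lemma sum_counts_eq_countP (R : List Int) (hR : R.Nodup) (f : Int → Int)
    (kl : List (Int × Int)) (hmem : ∀ q ∈ kl, q.1 ∈ R) :
    (R.map (fun r => kl.count (r, f r))).sum = kl.countP (fun q => q.2 == f q.1) := by
  induction kl with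
  | nil => simp
  | cons q kl ih =>
      have hmem' : ∀ p ∈ kl, p.1 ∈ R := fun p hp => hmem p (List.mem_cons_of_mem _ hp)
      have hq : q.1 ∈ R := hmem q List.mem_cons_self
      simp only [List.count_cons, List.countP_cons]
      rw [List.sum_map_add, ih hmem']
      have e : (R.map (fun r => if (q == (r, f r)) = true then (1 : Nat) else 0)).sum
             = (R.map (fun r => if q = (r, f r) then (1 : Nat) else 0)).sum := by
        refine congrArg List.sum (List.map_congr_left fun r _ => ?_)
        by_cases h : q = (r, f r)
        · simp [h]
        · simp [h]
      rw [e, sum_count_single R hR f q]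
      by_cases hm : q.2 = f q.1
      · simp [hm, hq]
      · simp [hm, hq]

-- (i % 40) % L = i % L whenever L > 0 divides 40 (the three pattern lengths do).
lemma mod_mod_forty (i L : Int) (hL : 0 < L) (hdvd : L ∣ 40) :
    PySem.Int.mod (PySem.Int.mod i 40) L = PySem.Int.mod i L := by
  rw [PySem.Int.mod_eq_emod_of_pos (show (0:Int) < 40 by norm_num)]
  rw [PySem.Int.mod_eq_emod_of_pos hL, PySem.Int.mod_eq_emod_of_pos hL]
  exact Int.emod_emod_of_dvd i hdvd

-- range(40) has no duplicate keys.
lemma nodup_range40 : (PySem.List.pyRange 0 40 1).Nodup := by decide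

-- a sum of prop-indicators is a countP
lemma sum_ite_prop (l : List Int) (P : Int → Prop) [DecidablePred P] :
    (l.map (fun i => if P i then (1 : Int) else 0)).sum
    = ((l.countP (fun i => decide (P i)) : Nat) : Int) := by
  rw [← PySem.List.sum_map_ite_one_zero (fun i => decide (P i)) l]
  refine congrArg List.sum (List.map_congr_left fun i _ => ?_)
  by_cases h : P i <;> simp [h]

-- the histogram fold, looked up: value at v = number of keyed pairs equal to v
lemma getD_cnt (l : List (Int × Int)) (d : PySem.Dict (Int × Int) Int) (v : Int × Int) :
    (l.foldl (fun dd p => dd.insert (PySem.Int.mod p.1 40, p.2)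
        (dd.getD (PySem.Int.mod p.1 40, p.2) 0 + 1)) d).getD v 0
    = d.getD v 0 + (((l.map (fun p => (PySem.Int.mod p.1 40, p.2))).count v : Nat) : Int) := by
  induction l generalizing d with
  | nil => simp
  | cons x l ih =>
      simp only [List.foldl_cons, List.map_cons, List.count_cons, ih]
      by_cases h : v = (PySem.Int.mod x.1 40, x.2)
      · subst h
        rw [PySem.Dict.getD_insert_self, beq_self_eq_true, if_pos rfl]
        push_cast
        ring
      · rw [PySem.Dict.getD_insert_of_ne _ _ _ h]
        have hne : ((PySem.Int.mod x.1 40, x.2) == v) = false :=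
          beq_eq_false_iff_ne.mpr (fun hh => h hh.symm)
        rw [hne]
        simp

-- B's score for one pattern equals A's direct per-index match count.
lemma score_eq (answers pat : List Int) (hL : 0 < (pat.length : Int)) (hdvd : (pat.length : Int) ∣ 40) :
    ((PySem.List.pyRange 0 40 1).map
      (fun r => ((PySem.List.enumerate answers).foldl
          (fun d p =>
            let k : Int × Int := (PySem.Int.mod p.1 40, p.2)
            d.insert k (d.getD k 0 + 1))
          PySem.Dict.empty).getD
        (r, PySem.List.pyGetD pat (PySem.Int.mod r (pat.length : Int)) 0) 0)).sum
    = ((PySem.List.pyRange 0 (answers.length : Int) 1).map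
        (fun i => if PySem.List.pyGetD pat (PySem.Int.mod i (pat.length : Int)) 0
                     = PySem.List.pyGetD answers i 0 then (1 : Int) else 0)).sum := by
  have hmem : ∀ q ∈ (PySem.List.enumerate answers).map (fun p => (PySem.Int.mod p.1 40, p.2)),
      q.1 ∈ PySem.List.pyRange 0 40 1 := by
    intro q hq
    rcases List.mem_map.mp hq with ⟨p, hp, rfl⟩
    rw [PySem.List.mem_pyRange_one]
    exact ⟨PySem.Int.mod_nonneg _ (by norm_num), PySem.Int.mod_lt _ (by norm_num)⟩
  have h1 : ((PySem.List.pyRange 0 40 1).map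
      (fun r => ((PySem.List.enumerate answers).foldl
          (fun d p =>
            let k : Int × Int := (PySem.Int.mod p.1 40, p.2)
            d.insert k (d.getD k 0 + 1))
          PySem.Dict.empty).getD
        (r, PySem.List.pyGetD pat (PySem.Int.mod r (pat.length : Int)) 0) 0)).sum
      = ((PySem.List.pyRange 0 40 1).map
          (fun r => ((((PySem.List.enumerate answers).map
              (fun p => (PySem.Int.mod p.1 40, p.2))).count
              (r, PySem.List.pyGetD pat (PySem.Int.mod r (pat.length : Int)) 0) : Nat) : Int))).sum := by
    refine congrArg List.sum (List.map_congr_left fun r _ => ?_)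
    simp only [getD_cnt]
    simp
  rw [h1]
  have h2 : ((PySem.List.pyRange 0 40 1).map
        (fun r => ((((PySem.List.enumerate answers).map
            (fun p => (PySem.Int.mod p.1 40, p.2))).count
            (r, PySem.List.pyGetD pat (PySem.Int.mod r (pat.length : Int)) 0) : Nat) : Int))).sum
      = ((((PySem.List.enumerate answers).map (fun p => (PySem.Int.mod p.1 40, p.2))).countP
          (fun q => q.2 == PySem.List.pyGetD pat (PySem.Int.mod q.1 (pat.length : Int)) 0) : Nat) : Int) := by
    rw [← sum_counts_eq_countP (PySem.List.pyRange 0 40 1) nodup_range40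
        (fun r => PySem.List.pyGetD pat (PySem.Int.mod r (pat.length : Int)) 0) _ hmem]
    rw [Nat.cast_list_sum, List.map_map]
    rfl
  rw [h2, sum_ite_prop]
  rw [List.countP_map]
  rw [PySem.List.enumerate_eq_map_pyRange (d := 0), List.countP_map]
  simp only [PySem.List.len_eq]
  congr 1
  refine List.countP_congr (fun i hi => ?_)
  have hi0 : 0 ≤ i := (PySem.List.mem_pyRange_one.mp hi).1
  simp only [Function.comp_def]
  rw [mod_mod_forty i (pat.length : Int) hL hdvd]
  by_cases h : PySem.List.pyGetD pat (PySem.Int.mod i (pat.length : Int)) 0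
      = PySem.List.pyGetD answers i 0
  · simp [h]
  · have h' : ¬ (PySem.List.pyGetD answers i 0
        = PySem.List.pyGetD pat (PySem.Int.mod i (pat.length : Int)) 0) := fun hh => h hh.symm
    simp [h, h']

-- ===== VERDICT (by name: the statement is the Claim_ definition above) =====
theorem solution_spec : Claim_equal_solution := by
  intro answers _
  show solution answers = solution_alt answers
  unfold solution solution_alt
  simp only [List.map_cons, List.map_nil]
  rw [triple_fold]
  rw [score_eq answers [1, 2, 3, 4, 5] (by norm_num) (by norm_num),
      score_eq answers [2, 1, 2, 3, 2, 4, 2, 5] (by norm_num) (by norm_num),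
      score_eq answers [3, 3, 1, 1, 2, 2, 4, 4, 5, 5] (by norm_num) (by norm_num)]
  norm_num
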